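-- pv_equiv track=rewrite | github.com/jsg921019/python_algorithm_live_session | 1.py | solution
-- ===== SOURCE A (Python) =====
-- def solution(expression):
--
--     l = []
--     prev = None
--     sign = 1
--
--     for c in expression:
--
--         if c == '0':
--             if prev == '0':
--                 l[-1] += sign
--             else:
--                 l.append(0)
--         else:
--             if prev == '+' or prev == '-':
--                 return 'ERROR'
--             else:
--                 if c == '+':
--                     sign = 1
--                 else:
--                     sign = -1
--
--         prev = c
--
--     if prev =='+' or prev == '-':
--         return 'ERROR'
--
--     return str(sum(l))
-- ===== SOURCE B (Python) =====
-- def solution(expression):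
--     s = expression
--     n = len(s)
--     # pass 1: a '+'/'-' not immediately followed by '0' (including at end) is an error
--     for i in range(n):
--         if s[i] in '+-' and (i + 1 >= n or s[i + 1] != '0'):
--             return 'ERROR'
--     # pass 2: run-based sum: each zero run of length k contributes (k-1)*sign
--     total = 0
--     sign = 1
--     i = 0
--     while i < n:
--         c = s[i]
--         i += 1
--         if c == '0':
--             j = i
--             while j < n and s[j] == '0':
--                 j += 1
--             total += (j - i) * sign
--             i = j
--         else:
--             sign = 1 if c == '+' else -1
--     return str(total)
-- ===== Notes on version B (the rewrite author's own statement) =====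
-- stated objective: alternative
-- what changed: Replaces A's single pass that maintains a list of per-run sums (mutating l[-1]) and a prev-char variable with a two-pass scheme: a lookahead pass that flags any '+'/'-' not immediately followed by '0' as ERROR, then an index-based pass that skips each zero run and adds (run length - 1) * sign to a running total.
import Mathlib
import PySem

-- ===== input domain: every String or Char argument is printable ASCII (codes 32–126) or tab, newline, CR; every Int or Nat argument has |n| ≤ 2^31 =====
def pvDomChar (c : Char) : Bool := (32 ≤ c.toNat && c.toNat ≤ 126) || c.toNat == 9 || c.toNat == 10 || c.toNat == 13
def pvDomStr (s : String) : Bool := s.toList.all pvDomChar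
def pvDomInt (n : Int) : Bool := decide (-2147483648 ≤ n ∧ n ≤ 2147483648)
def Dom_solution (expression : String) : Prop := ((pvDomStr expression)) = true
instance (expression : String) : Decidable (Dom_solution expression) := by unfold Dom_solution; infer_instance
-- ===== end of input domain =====

-- B replaces A's one-pass list-of-run-sums accumulation with a lookahead error pass
-- plus a run-skipping summation pass (alternative decomposition, same cost).

-- ===== PORT A =====
-- l[-1] += sign : modify the last element; exact here since Python's l is nonempty
-- whenever this line runs (prev == '0' implies a '0' was already appended).
def pvAddLast (l : List Int) (s : Int) : List Int :=
  match l with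
  | [] => []
  | [x] => [x + s]
  | x :: xs => x :: pvAddLast xs s

-- the for-loop; `none` = the early `return 'ERROR'`
def pvALoop (cs : List Char) (l : List Int) (prev : Option Char) (sign : Int) :
    Option (List Int × Option Char × Int) :=
  match cs with
  | [] => some (l, prev, sign)
  | c :: rest =>
    if c == '0' then
      if prev == some '0' then pvALoop rest (pvAddLast l sign) (some c) sign
      else pvALoop rest (l ++ [0]) (some c) sign
    else
      if prev == some '+' || prev == some '-' then none
      else pvALoop rest l (some c) (if c == '+' then 1 else -1)

def solution (expression : String) : String :=
  match pvALoop expression.toList [] none 1 with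
  | none => "ERROR"
  | some (l, prev, _) =>
    if prev == some '+' || prev == some '-' then "ERROR"
    else PySem.Int.toStr l.sum

-- ===== PORT B =====
-- pass 1 (Source B's index loop, as recursion with the next char = head of the rest)
def pvBErr (cs : List Char) : Bool :=
  match cs with
  | [] => false
  | c :: rest =>
    if (c == '+' || c == '-') &&
        (match rest.head? with | none => true | some d => d != '0') then true
    else pvBErr rest

-- pass 2 (Source B's while loop: skip each zero run, adding (run length - 1) * sign)
def pvBLoop (cs : List Char) (total : Int) (sign : Int) : Int :=
  match cs with
  | [] => total
  | c :: rest =>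
    if c == '0' then
      pvBLoop (rest.dropWhile (· == '0'))
        (total + (rest.takeWhile (· == '0')).length * sign) sign
    else pvBLoop rest total (if c == '+' then 1 else -1)
  termination_by cs.length
  decreasing_by
  · simpa using Nat.lt_succ_of_le (List.length_dropWhile_le _ _)
  · simp

def solution_alt (expression : String) : String :=
  let cs := expression.toList
  if pvBErr cs then "ERROR" else PySem.Int.toStr (pvBLoop cs 0 1)

-- ===== PRECONDITION & SPEC =====
def Spec_solution (expression : String) (out : String) : Prop := out = solution_alt expression
instance (expression : String) (out : String) : Decidable (Spec_solution expression out) := by unfold Spec_solution; infer_instance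

-- ===== CLAIM (what is proved, stated in full; the proofs are below) =====
def Claim_equal_solution : Prop := ∀ (expression : String), Dom_solution expression → Spec_solution expression (solution expression)

-- ===== LEMMAS AND PROOFS =====

-- reference error predicate: p = "previous char was '+'/'-'"
def pvE (p : Bool) (cs : List Char) : Bool :=
  match cs with
  | [] => p
  | c :: rest => if c == '0' then pvE false rest else (p || pvE (c == '+' || c == '-') rest)

-- reference per-char sum: pz = "previous char was '0'"
def pvSum (pz : Bool) (cs : List Char) (sign : Int) : Int :=
  match cs with
  | [] => 0
  | c :: rest =>
    if c == '0' then (if pz then sign else 0) + pvSum true rest sign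
    else pvSum false rest (if c == '+' then 1 else -1)

theorem pvE_eq_bErr (cs : List Char) (p : Bool) :
    pvE p cs = ((p && (match cs.head? with | none => true | some d => d != '0')) || pvBErr cs) := by
  induction cs generalizing p with
  | nil => simp [pvE, pvBErr]
  | cons c rest ih =>
    by_cases h : c = '0'
    · subst h; simp [pvE, pvBErr, ih]
    · have hb : pvBErr (c :: rest)
          = (((c == '+' || c == '-') &&
              (match rest.head? with | none => true | some d => d != '0')) || pvBErr rest) := by
        simp only [pvBErr]
        cases hx : (((c == '+' || c == '-') &&
            (match rest.head? with | none => true | some d => d != '0'))) <;> simp [hx]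
      simp only [pvE, hb, List.head?_cons]
      have hc' : (c == '0') = false := by simp [h]
      have hn : (c != '0') = true := by simp [h]
      simp [hc', ih, hn]

theorem pvAddLast_sum (l : List Int) (s : Int) (h : l ≠ []) :
    (pvAddLast l s).sum = l.sum + s := by
  induction l with
  | nil => simp at h
  | cons x xs ih =>
    cases xs with
    | nil => simp [pvAddLast, Int.add_comm]
    | cons y ys => simp [pvAddLast, ih (by simp)]; ring

theorem pvAddLast_ne_nil (l : List Int) (s : Int) (h : l ≠ []) : pvAddLast l s ≠ [] := by
  cases l with
  | nil => simp at h
  | cons x xs => cases xs <;> simp [pvAddLast]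

-- A's loop from any reachable state computes the reference error flag and sum
theorem pvALoop_char (cs : List Char) (l : List Int) (prev : Option Char) (sign : Int)
    (h : prev = some '0' → l ≠ []) :
    (match pvALoop cs l prev sign with
     | none => "ERROR"
     | some (l', prev', _) =>
        if prev' == some '+' || prev' == some '-' then "ERROR"
        else PySem.Int.toStr l'.sum)
    = if pvE (prev == some '+' || prev == some '-') cs then "ERROR"
      else PySem.Int.toStr (l.sum + pvSum (prev == some '0') cs sign) := by
  induction cs generalizing l prev sign with
  | nil =>
    simp only [pvALoop, pvE, pvSum]
    cases hpm : (prev == some '+' || prev == some '-') <;> simp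
  | cons c rest ih =>
    by_cases hc : c = '0'
    · subst hc
      by_cases hz : prev = some '0'
      · have hl := h hz
        rw [show pvALoop ('0' :: rest) l prev sign
              = pvALoop rest (pvAddLast l sign) (some '0') sign from by simp [pvALoop, hz]]
        rw [ih _ (some '0') sign (fun _ => pvAddLast_ne_nil l sign hl)]
        simp only [pvE, pvSum, hz, pvAddLast_sum l sign hl]
        by_cases he : pvE false rest = true <;> simp [he] <;> ring_nf
      · have hz' : (prev == some '0') = false := by
          cases prev with
          | none => rfl
          | some p => simp; intro hp; exact hz (by rw [hp])
        rw [show pvALoop ('0' :: rest) l prev sign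
              = pvALoop rest (l ++ [0]) (some '0') sign from by simp [pvALoop, hz']]
        rw [ih (l ++ [0]) (some '0') sign (fun _ => by simp)]
        simp [pvE, pvSum, hz']
    · have hc' : (c == '0') = false := by simp [hc]
      cases hpm : (prev == some '+' || prev == some '-') with
      | true =>
        rw [show pvALoop (c :: rest) l prev sign = none from by simp [pvALoop, hc', hpm]]
        simp [pvE, hc']
      | false =>
        rw [show pvALoop (c :: rest) l prev sign
              = pvALoop rest l (some c) (if c == '+' then 1 else -1) from by
            simp [pvALoop, hc', hpm]]
        rw [ih l (some c) _ (fun hh => by simp at hh; exact absurd hh hc)]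
        have h1 : (some c == some '0') = false := by simp [hc]
        simp [pvE, pvSum, hc', h1]

-- B's while loop computes the reference sum
theorem pvSum_run (cs : List Char) (sign : Int) :
    pvSum true cs sign
      = (cs.takeWhile (· == '0')).length * sign + pvSum false (cs.dropWhile (· == '0')) sign := by
  induction cs generalizing sign with
  | nil => simp [pvSum]
  | cons c rest ih =>
    by_cases h : c = '0'
    · subst h
      simp only [List.takeWhile_cons, List.dropWhile_cons]
      simp [pvSum, ih, List.length_cons]
      ring
    · simp [pvSum, h]

theorem pvBLoop_char (cs : List Char) (t sign : Int) :
    pvBLoop cs t sign = t + pvSum false cs sign := by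
  induction cs, t, sign using pvBLoop.induct with
  | case1 total sign => simp [pvBLoop, pvSum]
  | case2 total sign c rest hc ih =>
    simp only [dite_eq_ite] at ih
    rw [pvBLoop, if_pos hc, ih, pvSum, if_pos hc, pvSum_run]
    push_cast
    ring
  | case3 total sign c rest hc ih =>
    simp only [dite_eq_ite] at ih
    rw [pvBLoop, if_neg hc, ih, pvSum, if_neg hc]

-- ===== VERDICT (by name: the statement is the Claim_ definition above) =====
theorem solution_spec : Claim_equal_solution := by
  intro e _
  show solution e = solution_alt e
  unfold solution solution_alt
  rw [pvALoop_char e.toList [] none 1 (by simp)]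
  simp only [show ((none : Option Char) == some '+' || (none : Option Char) == some '-') = false from rfl,
    show ((none : Option Char) == some '0') = false from rfl]
  rw [pvE_eq_bErr, pvBLoop_char]
  simp
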